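-- pv_equiv track=rewrite | github.com/Madeeha-Anjum/puzzling-problems | CodeWars/7KYU/Printer_Errors.py | printer_error1
-- ===== SOURCE A (Python) =====
-- def printer_error1(s):
--     # aaabbbbhaijjjm -> printer used 3 times color a and ect...
--     # return errors/length of string
--     # errors include letters not in a to m
--     # convert to ASCII and see if any of the numbers are between 110 and 122
--
--     lst = list(map(lambda x: ord(x), s))
--     dic = {}
--     for num in lst:
--         if num in dic:
--             dic[num] = dic[num] + 1
--         else:
--             dic[num] = 1
--     # find how many are between 110 and 122
--     err = 0
--     for key, item in dic.items():
--         if key > 110:  # ord('n')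
--             err = err + dic[key]
--
--     return str(err) + "/" + str(len(s))
-- ===== SOURCE B (Python) =====
-- def printer_error1(s):
--     err = sum(1 for c in s if ord(c) > 110)
--     return str(err) + "/" + str(len(s))
-- ===== Notes on version B (the rewrite author's own statement) =====
-- stated objective: simpler
-- what changed: Drops the two-phase histogram (build a frequency dict, then sum counts of distinct keys > 110) for a single direct pass counting characters with ord(c) > 110.
import Mathlib
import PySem

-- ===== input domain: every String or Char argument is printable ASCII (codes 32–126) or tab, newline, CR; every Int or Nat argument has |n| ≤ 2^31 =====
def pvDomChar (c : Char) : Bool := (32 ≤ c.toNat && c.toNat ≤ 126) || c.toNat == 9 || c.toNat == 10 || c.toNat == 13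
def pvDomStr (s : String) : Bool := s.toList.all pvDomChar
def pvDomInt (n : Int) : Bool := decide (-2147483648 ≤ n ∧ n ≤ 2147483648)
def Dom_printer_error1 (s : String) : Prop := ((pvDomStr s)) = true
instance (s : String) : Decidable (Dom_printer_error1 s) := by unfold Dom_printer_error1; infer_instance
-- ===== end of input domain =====

-- B replaces A's two-phase histogram (frequency dict, then sum counts of keys > 110)
-- with one direct pass counting characters whose code exceeds 110: simpler, same result.


-- ===== PORT A =====
def printer_error1 (s : String) : String :=
  -- lst = list(map(lambda x: ord(x), s))
  let lst : List Int := s.toList.map (fun c => (c.toNat : Int))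
  -- dic = {}; for num in lst: if num in dic: dic[num] = dic[num] + 1 else: dic[num] = 1
  let dic : PySem.Dict Int Int :=
    lst.foldl (fun d num =>
      if d.contains num then d.insert num (d.getD num 0 + 1) else d.insert num 1)
      PySem.Dict.empty
  -- err = 0; for key, item in dic.items(): if key > 110: err = err + dic[key]
  let err : Int :=
    dic.items.foldl (fun e kv => if kv.1 > 110 then e + dic.getD kv.1 0 else e) 0
  -- return str(err) + "/" + str(len(s))
  PySem.Int.toStr err ++ "/" ++ PySem.Int.toStr (PySem.Str.len s)

-- ===== PORT B =====
def printer_error1_alt (s : String) : String :=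
  -- err = sum(1 for c in s if ord(c) > 110)
  let err : Int := (s.toList.countP (fun c => (c.toNat : Int) > 110) : Int)
  -- return str(err) + "/" + str(len(s))
  PySem.Int.toStr err ++ "/" ++ PySem.Int.toStr (PySem.Str.len s)

-- ===== PRECONDITION & SPEC =====
def Spec_printer_error1 (s : String) (out : String) : Prop := out = printer_error1_alt s
instance (s : String) (out : String) : Decidable (Spec_printer_error1 s out) := by unfold Spec_printer_error1; infer_instance

-- ===== CLAIM (what is proved, stated in full; the proofs are below) =====
def Claim_equal_printer_error1 : Prop := ∀ (s : String), Dom_printer_error1 s → Spec_printer_error1 s (printer_error1 s)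

-- ===== LEMMAS AND PROOFS =====

-- A's histogram loop builds exactly the counter of lst.
theorem pv_dict_eq_counter (lst : List Int) :
    lst.foldl (fun d num =>
      if d.contains num then d.insert num (d.getD num 0 + 1) else d.insert num 1)
      PySem.Dict.empty = PySem.Dict.counter lst := by
  rw [← PySem.Dict.foldl_insert_getD_add_one_eq_counter]
  apply PySem.List.foldl_congr_mem
  intro d num _
  by_cases h : d.contains num
  · simp [h]
  · simp only [Bool.not_eq_true] at h
    simp [h, PySem.Dict.getD_of_not_contains d 0 h]

-- summing the multiplicities of the distinct keys > 110 counts the elements > 110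
theorem pv_sum_counts_eq_countP (lst : List Int) :
    (((PySem.Set.ofList lst).filter (fun k => decide (k > 110))).map
      (fun k => (lst.count k : Int))).sum = (lst.countP (fun k => decide (k > 110)) : Int) := by
  have hperm : ((PySem.Set.ofList lst).filter (fun k => decide (k > 110))).Perm
      (lst.dedup.filter (fun k => decide (k > 110))) := by
    apply List.Perm.filter
    apply (List.perm_ext_iff_of_nodup (PySem.Set.nodup_ofList lst) lst.nodup_dedup).mpr
    intro a
    simp [PySem.Set.mem_ofList, List.mem_dedup]
  calc (((PySem.Set.ofList lst).filter (fun k => decide (k > 110))).map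
        (fun k => (lst.count k : Int))).sum
      = ((lst.dedup.filter (fun k => decide (k > 110))).map
        (fun k => (lst.count k : Int))).sum := (hperm.map _).sum_eq
    _ = (((lst.dedup.filter (fun k => decide (k > 110))).map (fun k => lst.count k)).sum : Int) := by
        rw [Nat.cast_list_sum, List.map_map]; rfl
    _ = (lst.countP (fun k => decide (k > 110)) : Int) := by
        rw [List.sum_map_count_dedup_filter_eq_countP]

-- ===== VERDICT (by name: the statement is the Claim_ definition above) =====
theorem printer_error1_spec : Claim_equal_printer_error1 := by
  intro s _
  show printer_error1 s = printer_error1_alt s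
  unfold printer_error1 printer_error1_alt
  simp only []
  set lst : List Int := s.toList.map (fun c => (c.toNat : Int)) with hlst
  rw [pv_dict_eq_counter]
  rw [PySem.List.foldl_ite_eq_foldl_filter (fun kv : Int × Int => kv.1 > 110)
      (fun e kv => e + (PySem.Dict.counter lst).getD kv.1 0)]
  rw [PySem.List.foldl_add]
  simp only [PySem.Dict.items_counter, List.filter_map, List.map_map, zero_add]
  have h1 : ((fun (kv : Int × Int) => decide (kv.1 > 110)) ∘ fun k => (k, (lst.count k : Int)))
      = fun k => decide (k > 110) := rfl
  have h2 : ((fun (kv : Int × Int) => (PySem.Dict.counter lst).getD kv.1 0) ∘ fun k => (k, (lst.count k : Int)))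
      = fun k => ((lst.count k : Nat) : Int) := by
    funext k; simp [PySem.Dict.getD_counter]
  rw [h1, h2, pv_sum_counts_eq_countP, hlst, List.countP_map]
  rfl
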